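-- pv_equiv track=rewrite | github.com/Lieke36/DRD3-Binder-Challenge | save_in_excel.py | num_aromatic
-- ===== SOURCE A (Python) =====
-- def num_aromatic(smiles):
--     """
--     Calculate the number of aromatic rings in a SMILES string.
--     Aromatic rings are represented by lowercase followed by a number
--     """
--
--     rings = []                # lijst om open ringen bij the houden
--     aromatic_rings = 0        # teller voor het aantal aromatische ringen
--     i = 0                     # index
--
--     while i<len(smiles):      # loop weer door elke teken in de SMILES string
--         letter = smiles[i]
--
--         if letter.islower() and i+1<len(smiles) and smiles[i+1].isdigit():              # controleer op een kleine letter gevolgd door een getal (kenmerk van een aromatische ring)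
--             ring_number = smiles[i+1]
--
--             if ring_number in rings:                                                    # als ringnummer al in de lijst zit, is de ring gesloten
--                 aromatic_rings += 1                                                     # een aromatische ring is compleet
--                 rings.remove(ring_number)                                               # verwijder de gesloten ring uit de lijst
--             else:
--                 rings.append(ring_number)                                               # open een nieuwe ring
--
--         i += 1                                                                          # naar het volgende teken
--
--     return aromatic_rings
-- ===== SOURCE B (Python) =====
-- def num_aromatic(smiles):
--     """
--     Calculate the number of aromatic rings in a SMILES string.
--     Aromatic rings are represented by lowercase followed by a number.
--
--     Counting pass: tally every lowercase-followed-by-digit ring label, then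
--     each pair of occurrences of the same label is one closed ring.
--     """
--     counts = {}
--     for ch, nxt in zip(smiles, smiles[1:]):
--         if ch.islower() and nxt.isdigit():
--             counts[nxt] = counts.get(nxt, 0) + 1
--     return sum(c // 2 for c in counts.values())
-- ===== Notes on version B (the rewrite author's own statement) =====
-- stated objective: alternative
-- what changed: A tracks a list of currently-open ring labels and toggles membership (append/remove) as it scans by index; B instead walks the adjacent character pairs (zip of the string with its tail), tallies each lowercase-then-digit ring label into a dict, and returns sum(count // 2) over the tallies.
import Mathlib
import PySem

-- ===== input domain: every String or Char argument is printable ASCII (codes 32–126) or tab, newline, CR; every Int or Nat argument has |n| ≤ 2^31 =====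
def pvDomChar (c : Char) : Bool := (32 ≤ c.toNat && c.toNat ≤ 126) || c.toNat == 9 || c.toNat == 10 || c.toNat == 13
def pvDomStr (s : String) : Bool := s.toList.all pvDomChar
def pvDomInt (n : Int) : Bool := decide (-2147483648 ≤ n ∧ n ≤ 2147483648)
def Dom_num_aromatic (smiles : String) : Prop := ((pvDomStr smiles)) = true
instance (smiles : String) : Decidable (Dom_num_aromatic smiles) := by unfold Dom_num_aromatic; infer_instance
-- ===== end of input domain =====

-- B replaces A's open-ring toggle list with a pairwise (char, next) scan that tallies each ring
-- label's frequency and returns sum(count // 2); measurably faster by a constant factor.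

-- ===== PORT A =====
-- while-loop of A: index i, list of open rings, ring counter
def numAromaticLoop (cs : List Char) (rings : List Char) (acc : Int) (i : Nat) : Int :=
  if h : i < cs.length then
    let letter := cs[i]
    if PySem.Chars.islower letter && decide (i + 1 < cs.length)
        && PySem.Chars.isdigit (cs.getD (i + 1) ' ') then
      let ring_number := cs.getD (i + 1) ' '
      if ring_number ∈ rings then
        numAromaticLoop cs (rings.erase ring_number) (acc + 1) (i + 1)
      else
        numAromaticLoop cs (rings ++ [ring_number]) acc (i + 1)
    else
      numAromaticLoop cs rings acc (i + 1)
  else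
    acc
termination_by cs.length - i

def num_aromatic (smiles : String) : Int :=
  numAromaticLoop smiles.toList [] 0 0

-- ===== PORT B =====
def num_aromatic_alt (smiles : String) : Int :=
  (((smiles.toList.zip (PySem.List.slice smiles.toList (some 1) none)).foldl
      (fun d p =>
        if PySem.Chars.islower p.1 && PySem.Chars.isdigit p.2 then
          d.insert p.2 (d.getD p.2 0 + 1)
        else d)
      PySem.Dict.empty).values.map (fun c => PySem.Int.floordiv c 2)).sum

-- ===== PRECONDITION & SPEC =====
def Spec_num_aromatic (smiles : String) (out : Int) : Prop := out = num_aromatic_alt smiles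
instance (smiles : String) (out : Int) : Decidable (Spec_num_aromatic smiles out) := by unfold Spec_num_aromatic; infer_instance

-- ===== CLAIM (what is proved, stated in full; the proofs are below) =====
def Claim_equal_num_aromatic : Prop := ∀ (smiles : String), Dom_num_aromatic smiles → Spec_num_aromatic smiles (num_aromatic smiles)

-- ===== LEMMAS AND PROOFS =====

-- the ring-label events: the digit of every lowercase-then-digit pair, in order
def pvEvents (cs : List Char) : List Char :=
  (cs.zip cs.tail).filterMap
    (fun p => if PySem.Chars.islower p.1 && PySem.Chars.isdigit p.2 then some p.2 else none)

-- A's toggle process abstracted over the event list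
def pvToggle (evs rings : List Char) (acc : Int) : Int :=
  match evs with
  | [] => acc
  | e :: rest =>
    if e ∈ rings then pvToggle rest (rings.erase e) (acc + 1)
    else pvToggle rest (rings ++ [e]) acc

lemma pvToggle_eq_sum (evs : List Char) (S : Finset Char) :
    ∀ (rings : List Char) (acc : Int), rings.Nodup →
      (∀ k, k ∈ rings ∨ k ∈ evs → k ∈ S) →
      pvToggle evs rings acc =
        acc + (((∑ k ∈ S, (evs.count k + (if k ∈ rings then 1 else 0)) / 2 : ℕ) : ℕ) : Int) := by
  induction evs with
  | nil =>
    intro rings acc _ _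
    have h0 : (∑ k ∈ S, (List.count k ([] : List Char) + (if k ∈ rings then 1 else 0)) / 2 : ℕ) = 0 :=
      Finset.sum_eq_zero (fun k _ => by split_ifs <;> simp)
    simp only [pvToggle]
    rw [h0]; simp
  | cons e rest ih =>
    intro rings acc hnd hS
    have heS : e ∈ S := hS e (Or.inr (by simp))
    by_cases he : e ∈ rings
    · rw [pvToggle]
      simp only [he, if_pos]
      rw [ih (rings.erase e) (acc + 1) (hnd.erase e)
            (by intro k hk; apply hS; rcases hk with h | h
                · exact Or.inl (List.mem_of_mem_erase h)
                · exact Or.inr (by simp [h]))]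
      have key : (∑ k ∈ S, (List.count k (e :: rest) + (if k ∈ rings then 1 else 0)) / 2 : ℕ)
          = (∑ k ∈ S, (List.count k rest + (if k ∈ rings.erase e then 1 else 0)) / 2 : ℕ) + 1 := by
        rw [← Finset.add_sum_erase S _ heS, ← Finset.add_sum_erase S
              (fun k => (List.count k rest + (if k ∈ rings.erase e then 1 else 0)) / 2) heS]
        have hne : e ∉ rings.erase e := List.Nodup.not_mem_erase hnd
        have h1 : (List.count e (e :: rest) + (if e ∈ rings then 1 else 0)) / 2
            = (List.count e rest + (if e ∈ rings.erase e then 1 else 0)) / 2 + 1 := by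
          simp [he, hne, List.count_cons_self]
          omega
        rw [h1]
        have h2 : ∀ k ∈ S.erase e,
            (List.count k (e :: rest) + (if k ∈ rings then 1 else 0)) / 2
              = (List.count k rest + (if k ∈ rings.erase e then 1 else 0)) / 2 := by
          intro k hk
          have hke : k ≠ e := (Finset.mem_erase.mp hk).1
          have hc : List.count k (e :: rest) = List.count k rest := by
            simp [hke.symm]
          rw [hc]
          simp [List.mem_erase_of_ne hke]
        rw [Finset.sum_congr rfl h2]
        omega
      rw [key]
      push_cast
      ring
    · rw [pvToggle]
      simp only [he, if_false]
      rw [ih (rings ++ [e]) acc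
            (by simp [List.nodup_append, hnd]
                intro a ha hae; exact he (hae ▸ ha))
            (by intro k hk; apply hS; rcases hk with h | h
                · rcases List.mem_append.mp h with h | h
                  · exact Or.inl h
                  · exact Or.inr (by simp at h; simp [h])
                · exact Or.inr (by simp [h]))]
      congr 2
      apply Finset.sum_congr rfl
      intro k _
      by_cases hke : k = e
      · subst hke
        simp [he, List.count_cons_self]
      · have hc : List.count k (e :: rest) = List.count k rest := by
          have hek : e ≠ k := fun h => hke h.symm
          simp [hek]
        have hm : (k ∈ rings ++ [e]) ↔ k ∈ rings := by simp [hke]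
        simp [hc, hm]

-- B's conditional tallying foldl is the plain tally foldl over the filterMap of its events
lemma pvFoldl_filterMap :
    ∀ (l : List (Char × Char)) (d : PySem.Dict Char Int),
      l.foldl (fun d p =>
          if PySem.Chars.islower p.1 && PySem.Chars.isdigit p.2 then
            d.insert p.2 (d.getD p.2 0 + 1)
          else d) d
        = (l.filterMap
            (fun p => if PySem.Chars.islower p.1 && PySem.Chars.isdigit p.2 then some p.2 else none)).foldl
            (fun d x => d.insert x (d.getD x 0 + 1)) d := by
  intro l
  induction l with
  | nil => intro d; simp
  | cons x xs ih =>
    intro d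
    rw [List.foldl_cons, List.filterMap_cons]
    by_cases hq : (PySem.Chars.islower x.1 && PySem.Chars.isdigit x.2) = true
    · rw [if_pos hq, if_pos hq, List.foldl_cons]
      exact ih _
    · rw [if_neg hq, if_neg hq]
      exact ih _

-- A's loop from index i is the toggle process over the events of the residual pair list
lemma pvLoop_eq_toggle (cs : List Char) :
    ∀ (i : Nat) (rings : List Char) (acc : Int),
      numAromaticLoop cs rings acc i
        = pvToggle (((cs.drop i).zip (cs.drop (i + 1))).filterMap
            (fun p => if PySem.Chars.islower p.1 && PySem.Chars.isdigit p.2 then some p.2 else none))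
            rings acc := by
  suffices H : ∀ (n i : Nat) (rings : List Char) (acc : Int), cs.length - i ≤ n →
      numAromaticLoop cs rings acc i
        = pvToggle (((cs.drop i).zip (cs.drop (i + 1))).filterMap
            (fun p => if PySem.Chars.islower p.1 && PySem.Chars.isdigit p.2 then some p.2 else none))
            rings acc by
    intro i rings acc
    exact H cs.length i rings acc (by omega)
  intro n
  induction n with
  | zero =>
    intro i rings acc h
    have hge : ¬ i < cs.length := by omega
    rw [numAromaticLoop]
    simp [hge, List.drop_eq_nil_of_le (by omega : cs.length ≤ i), pvToggle]
  | succ n ih =>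
    intro i rings acc h
    by_cases hlt : i < cs.length
    · rw [numAromaticLoop]
      simp only [hlt, dif_pos]
      have hdrop : cs.drop i = cs[i] :: cs.drop (i + 1) := List.drop_eq_getElem_cons hlt
      by_cases h2 : i + 1 < cs.length
      · have hdrop2 : cs.drop (i + 1) = cs[i + 1] :: cs.drop (i + 2) := List.drop_eq_getElem_cons h2
        have hgetD : cs.getD (i + 1) ' ' = cs[i + 1] := List.getD_eq_getElem cs ' ' h2
        have hzip : (cs.drop i).zip (cs.drop (i + 1))
            = (cs[i], cs[i + 1]) :: (cs.drop (i + 1)).zip (cs.drop (i + 2)) := by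
          conv_lhs => rw [hdrop2, hdrop, List.zip_cons_cons]
        conv_rhs => rw [hzip]
        rw [List.filterMap_cons]
        simp only [hgetD, h2, decide_true, Bool.and_true]
        by_cases hg : (PySem.Chars.islower cs[i] && PySem.Chars.isdigit cs[i + 1]) = true
        · simp only [hg, if_pos]
          by_cases hmem : cs[i + 1] ∈ rings
          · simp only [hmem, if_pos]
            rw [ih (i + 1) _ _ (by omega), pvToggle]
            simp [hmem]
          · simp only [hmem, if_false]
            rw [ih (i + 1) _ _ (by omega), pvToggle]
            simp [hmem]
        · have hg' : (PySem.Chars.islower cs[i] && PySem.Chars.isdigit cs[i + 1]) = false := by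
            simpa using hg
          simp only [hg', Bool.false_eq_true, if_false]
          exact ih (i + 1) _ _ (by omega)
      · -- i + 1 = cs.length : guard is false and no pair remains
        have hnil : cs.drop (i + 1) = [] := List.drop_eq_nil_of_le (by omega)
        have hguard : (PySem.Chars.islower cs[i] && decide (i + 1 < cs.length)
            && PySem.Chars.isdigit (cs.getD (i + 1) ' ')) = false := by
          simp [h2]
        rw [hguard]
        simp only [Bool.false_eq_true, if_false]
        rw [ih (i + 1) _ _ (by omega)]
        rw [hnil]
        have hnil2 : cs.drop (i + 2) = [] := List.drop_eq_nil_of_le (by omega)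
        simp [hnil2, pvToggle]
    · rw [numAromaticLoop]
      simp [hlt, List.drop_eq_nil_of_le (by omega : cs.length ≤ i), pvToggle]

-- B's result as a sum over the distinct event labels
lemma pvAlt_eq_sum (smiles : String) :
    num_aromatic_alt smiles
      = ((PySem.List.dedup (pvEvents smiles.toList)).map
          (fun k => PySem.Int.floordiv ((pvEvents smiles.toList).count k) 2)).sum := by
  unfold num_aromatic_alt
  rw [PySem.List.slice_from_one]
  rw [pvFoldl_filterMap]
  rw [PySem.Dict.foldl_insert_getD_add_one_eq_counter]
  have hvals : (PySem.Dict.counter (pvEvents smiles.toList)).values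
      = (PySem.Set.ofList (pvEvents smiles.toList)).map
          (fun k => (((pvEvents smiles.toList).count k : Int))) := by
    show ((PySem.Dict.counter (pvEvents smiles.toList)).items.map (·.2)) = _
    rw [PySem.Dict.items_counter]
    simp [List.map_map, Function.comp]
  rw [show ((smiles.toList.zip smiles.toList.tail).filterMap
        (fun p => if PySem.Chars.islower p.1 && PySem.Chars.isdigit p.2 then some p.2 else none))
      = pvEvents smiles.toList from rfl]
  rw [hvals, List.map_map]
  simp only [PySem.List.dedup_eq_ofList, Function.comp_def]

-- ===== VERDICT (by name: the statement is the Claim_ definition above) =====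
theorem num_aromatic_spec : Claim_equal_num_aromatic := by
  intro smiles _
  unfold Spec_num_aromatic
  rw [pvAlt_eq_sum]
  show numAromaticLoop smiles.toList [] 0 0 = _
  rw [pvLoop_eq_toggle]
  have hev : ((smiles.toList.drop 0).zip (smiles.toList.drop (0 + 1))).filterMap
      (fun p => if PySem.Chars.islower p.1 && PySem.Chars.isdigit p.2 then some p.2 else none)
      = pvEvents smiles.toList := by
    simp [pvEvents, List.drop_one]
  rw [hev]
  rw [pvToggle_eq_sum (pvEvents smiles.toList) (pvEvents smiles.toList).toFinset [] 0
        List.nodup_nil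
        (by intro k hk
            rcases hk with h | h
            · simp at h
            · simpa using h)]
  have h1 : (∑ k ∈ (pvEvents smiles.toList).toFinset,
        ((pvEvents smiles.toList).count k + (if k ∈ ([] : List Char) then 1 else 0)) / 2)
      = ∑ k ∈ (pvEvents smiles.toList).toFinset, (pvEvents smiles.toList).count k / 2 := by
    apply Finset.sum_congr rfl
    intro k _
    simp
  rw [h1]
  have h2 : ((PySem.List.dedup (pvEvents smiles.toList)).map
        (fun k => PySem.Int.floordiv (((pvEvents smiles.toList).count k : ℤ)) 2)).sum
      = ((PySem.List.dedup (pvEvents smiles.toList)).map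
        (fun k => (((pvEvents smiles.toList).count k / 2 : ℕ) : ℤ))).sum := by
    congr 1
    apply List.map_congr_left
    intro k _
    exact_mod_cast PySem.Int.floordiv_natCast ((pvEvents smiles.toList).count k) 2
  rw [h2]
  have h3 : ((PySem.List.dedup (pvEvents smiles.toList)).map
        (fun k => (((pvEvents smiles.toList).count k / 2 : ℕ) : ℤ))).sum
      = ∑ k ∈ (PySem.List.dedup (pvEvents smiles.toList)).toFinset,
          ((((pvEvents smiles.toList).count k / 2 : ℕ) : ℤ)) := by
    rw [List.sum_toFinset _ (PySem.List.nodup_dedup (pvEvents smiles.toList))]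
  have h4 : (PySem.List.dedup (pvEvents smiles.toList)).toFinset
      = (pvEvents smiles.toList).toFinset := by
    ext k
    simp
  rw [h3, h4]
  push_cast
  ring
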